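-- pv_equiv track=rewrite | github.com/jkomkov/bulla | src/bulla/discover/prompt.py | parse_guided_response
-- ===== SOURCE A (Python) =====
-- def parse_guided_response(
--     raw: str,
--     n_obligations: int,
-- ) -> list[dict[str, str]]:
--     """Extract verdict blocks from a guided discovery LLM response.
--
--     Returns a list of dicts with keys: verdict, evidence, convention_value.
--     Length always equals ``n_obligations``; missing verdicts get UNCERTAIN.
--     """
--     results: list[dict[str, str]] = []
--     for idx in range(1, n_obligations + 1):
--         begin = f"---BEGIN_VERDICT_{idx}---"
--         end = f"---END_VERDICT_{idx}---"
--
--         verdict = "UNCERTAIN"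
--         evidence = ""
--         convention_value = ""
--
--         if begin in raw and end in raw:
--             start = raw.index(begin) + len(begin)
--             stop = raw.index(end)
--             block = raw[start:stop].strip()
--             for line in block.splitlines():
--                 line = line.strip()
--                 if line.lower().startswith("verdict:"):
--                     v = line.split(":", 1)[1].strip().upper()
--                     if v in ("CONFIRMED", "DENIED", "UNCERTAIN"):
--                         verdict = v
--                 elif line.lower().startswith("evidence:"):
--                     evidence = line.split(":", 1)[1].strip()
--                 elif line.lower().startswith("convention_value:"):
--                     cv = line.split(":", 1)[1].strip()
--                     if cv:
--                         convention_value = cv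
--
--         results.append({
--             "verdict": verdict,
--             "evidence": evidence,
--             "convention_value": convention_value,
--         })
--
--     return results
-- ===== SOURCE B (Python) =====
-- def _verdict_of(line):
--     if line.lower().startswith("verdict:"):
--         v = line.split(":", 1)[1].strip().upper()
--         if v in ("CONFIRMED", "DENIED", "UNCERTAIN"):
--             return v
--     return None
--
--
-- def _evidence_of(line):
--     if line.lower().startswith("evidence:"):
--         return line.split(":", 1)[1].strip()
--     return None
--
--
-- def _convention_of(line):
--     if line.lower().startswith("convention_value:"):
--         cv = line.split(":", 1)[1].strip()
--         if cv:
--             return cv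
--     return None
--
--
-- def _last(lines_reversed, f, default):
--     for line in lines_reversed:
--         v = f(line)
--         if v is not None:
--             return v
--     return default
--
--
-- def _one_block(raw, idx):
--     begin = f"---BEGIN_VERDICT_{idx}---"
--     end = f"---END_VERDICT_{idx}---"
--     b = raw.find(begin)
--     e = raw.find(end)
--     if b != -1 and e != -1:
--         block = raw[b + len(begin):e].strip()
--         lines = [ln.strip() for ln in block.splitlines()]
--         rev = list(reversed(lines))
--         return {
--             "verdict": _last(rev, _verdict_of, "UNCERTAIN"),
--             "evidence": _last(rev, _evidence_of, ""),
--             "convention_value": _last(rev, _convention_of, ""),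
--         }
--     return {"verdict": "UNCERTAIN", "evidence": "", "convention_value": ""}
--
--
-- def parse_guided_response(
--     raw: str,
--     n_obligations: int,
-- ) -> list[dict[str, str]]:
--     return [_one_block(raw, idx) for idx in range(1, n_obligations + 1)]
-- ===== Notes on version B (the rewrite author's own statement) =====
-- stated objective: alternative
-- what changed: B replaces A's accumulating result loop and its single forward fold over the block lines with a 3-field mutable state by a per-index list comprehension that, for each of the three fields independently, takes the first accepted line scanning the stripped lines in reverse (last-match-wins), using find()/-1 instead of 'in'+index().
import Mathlib
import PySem

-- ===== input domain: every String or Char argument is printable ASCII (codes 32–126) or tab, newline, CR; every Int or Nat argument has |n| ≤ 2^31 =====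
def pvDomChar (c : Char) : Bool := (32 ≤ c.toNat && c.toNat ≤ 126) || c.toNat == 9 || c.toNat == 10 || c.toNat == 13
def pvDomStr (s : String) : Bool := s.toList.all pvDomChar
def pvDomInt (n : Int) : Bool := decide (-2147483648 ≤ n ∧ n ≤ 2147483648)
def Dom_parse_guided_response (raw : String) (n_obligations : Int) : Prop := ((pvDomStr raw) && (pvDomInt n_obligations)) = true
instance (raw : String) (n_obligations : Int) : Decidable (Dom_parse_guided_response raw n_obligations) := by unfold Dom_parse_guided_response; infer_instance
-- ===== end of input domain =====

-- B replaces A's accumulating loop and single forward fold with a 3-field state by a per-index map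
-- and, per field, a first-match search over the reversed stripped lines (objective: alternative).

-- ===== PORT A =====
-- the value after the first ':' — line.split(":", 1)[1].strip(); the [1] is exact here because every
-- use is guarded by a startswith test whose prefix contains ':', so the split has a second part
def pvA_after_colon (line : String) : String :=
  PySem.Str.strip (PySem.List.pyGetD ((PySem.Str.splitMax? line ":" 1).getD []) 1 "")

-- one iteration of A's inner 'for line in block.splitlines()' loop over the state (verdict, evidence, convention_value)
def pvA_step (s : String × String × String) (line0 : String) : String × String × String :=
  let line := PySem.Str.strip line0
  if PySem.Str.startswith (PySem.Str.lower line) "verdict:" then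
    let v := PySem.Str.upper (pvA_after_colon line)
    if v = "CONFIRMED" ∨ v = "DENIED" ∨ v = "UNCERTAIN" then (v, s.2.1, s.2.2) else s
  else if PySem.Str.startswith (PySem.Str.lower line) "evidence:" then
    (s.1, pvA_after_colon line, s.2.2)
  else if PySem.Str.startswith (PySem.Str.lower line) "convention_value:" then
    let cv := pvA_after_colon line
    if cv ≠ "" then (s.1, s.2.1, cv) else s
  else s

def parse_guided_response (raw : String) (n_obligations : Int) : List (List (String × String)) :=
  (PySem.List.pyRange 1 (n_obligations + 1) 1).foldl (fun results idx =>
    let begin_ := "---BEGIN_VERDICT_" ++ PySem.Int.toStr idx ++ "---"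
    let end_ := "---END_VERDICT_" ++ PySem.Int.toStr idx ++ "---"
    let t : String × String × String :=
      if PySem.Str.isIn begin_ raw && PySem.Str.isIn end_ raw then
        -- raw.index(x) = Str.find raw x under the guard 'x in raw'
        let start := PySem.Str.find raw begin_ + PySem.Str.len begin_
        let stop := PySem.Str.find raw end_
        let block := PySem.Str.strip (PySem.Str.slice raw (some start) (some stop))
        (PySem.Str.splitlines block).foldl pvA_step ("UNCERTAIN", "", "")
      else ("UNCERTAIN", "", "")
    results ++ [[("verdict", t.1), ("evidence", t.2.1), ("convention_value", t.2.2)]])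
    []

-- ===== PORT B =====
-- the same guarded-exact split(":", 1)[1].strip() as in Source B's helpers
def pvB_after_colon (line : String) : String :=
  PySem.Str.strip (PySem.List.pyGetD ((PySem.Str.splitMax? line ":" 1).getD []) 1 "")

def pvB_verdict? (line : String) : Option String :=
  if PySem.Str.startswith (PySem.Str.lower line) "verdict:" then
    let v := PySem.Str.upper (pvB_after_colon line)
    if v = "CONFIRMED" ∨ v = "DENIED" ∨ v = "UNCERTAIN" then some v else none
  else none

def pvB_evidence? (line : String) : Option String :=
  if PySem.Str.startswith (PySem.Str.lower line) "evidence:" then some (pvB_after_colon line)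
  else none

def pvB_convention? (line : String) : Option String :=
  if PySem.Str.startswith (PySem.Str.lower line) "convention_value:" then
    let cv := pvB_after_colon line
    if cv ≠ "" then some cv else none
  else none

-- Source B's _last: first line (of the already-reversed list) on which f returns a value
def pvB_last (lines : List String) (f : String → Option String) (dflt : String) : String :=
  match lines with
  | [] => dflt
  | l :: ls => match f l with
    | some v => v
    | none => pvB_last ls f dflt

def pvB_one (raw : String) (idx : Int) : List (String × String) :=
  let begin_ := "---BEGIN_VERDICT_" ++ PySem.Int.toStr idx ++ "---"
  let end_ := "---END_VERDICT_" ++ PySem.Int.toStr idx ++ "---"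
  let b := PySem.Str.find raw begin_
  let e := PySem.Str.find raw end_
  if b ≠ -1 ∧ e ≠ -1 then
    let block := PySem.Str.strip (PySem.Str.slice raw (some (b + PySem.Str.len begin_)) (some e))
    let rev := ((PySem.Str.splitlines block).map PySem.Str.strip).reverse
    [("verdict", pvB_last rev pvB_verdict? "UNCERTAIN"),
     ("evidence", pvB_last rev pvB_evidence? ""),
     ("convention_value", pvB_last rev pvB_convention? "")]
  else [("verdict", "UNCERTAIN"), ("evidence", ""), ("convention_value", "")]

def parse_guided_response_alt (raw : String) (n_obligations : Int) : List (List (String × String)) :=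
  (PySem.List.pyRange 1 (n_obligations + 1) 1).map (pvB_one raw)

-- ===== PRECONDITION & SPEC =====
def Spec_parse_guided_response (raw : String) (n_obligations : Int) (out : List (List (String × String))) : Prop := out = parse_guided_response_alt raw n_obligations
instance (raw : String) (n_obligations : Int) (out : List (List (String × String))) : Decidable (Spec_parse_guided_response raw n_obligations out) := by unfold Spec_parse_guided_response; infer_instance

-- ===== CLAIM (what is proved, stated in full; the proofs are below) =====
def Claim_equal_parse_guided_response : Prop := ∀ (raw : String) (n_obligations : Int), Dom_parse_guided_response raw n_obligations → Spec_parse_guided_response raw n_obligations (parse_guided_response raw n_obligations)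

-- ===== LEMMAS AND PROOFS =====

-- two distinct-first-character prefixes cannot both be prefixes of the same string
theorem pv_prefix_disjoint {p q s : List Char} (hp : p <+: s) (hq : q <+: s)
    (hne : p.head? ≠ q.head?) (hpn : p ≠ []) (hqn : q ≠ []) : False := by
  rcases p with _ | ⟨a, p⟩; · exact hpn rfl
  rcases q with _ | ⟨b, q⟩; · exact hqn rfl
  rcases hp with ⟨t1, h1⟩
  rcases hq with ⟨t2, h2⟩
  rw [← h1] at h2
  simp only [List.cons_append, List.cons.injEq] at h2
  exact hne (by simp [h2.1])

theorem pv_startswith_v_not_e (s : String) (h : PySem.Str.startswith s "verdict:" = true) :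
    PySem.Str.startswith s "evidence:" = false := by
  rw [PySem.Str.startswith_eq] at h ⊢
  rw [PySem.Chars.startswith_iff] at h
  by_contra hc
  rw [Bool.not_eq_false, PySem.Chars.startswith_iff] at hc
  exact pv_prefix_disjoint h hc (by decide) (by decide) (by decide)

theorem pv_startswith_v_not_c (s : String) (h : PySem.Str.startswith s "verdict:" = true) :
    PySem.Str.startswith s "convention_value:" = false := by
  rw [PySem.Str.startswith_eq] at h ⊢
  rw [PySem.Chars.startswith_iff] at h
  by_contra hc
  rw [Bool.not_eq_false, PySem.Chars.startswith_iff] at hc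
  exact pv_prefix_disjoint h hc (by decide) (by decide) (by decide)

theorem pv_startswith_e_not_c (s : String) (h : PySem.Str.startswith s "evidence:" = true) :
    PySem.Str.startswith s "convention_value:" = false := by
  rw [PySem.Str.startswith_eq] at h ⊢
  rw [PySem.Chars.startswith_iff] at h
  by_contra hc
  rw [Bool.not_eq_false, PySem.Chars.startswith_iff] at hc
  exact pv_prefix_disjoint h hc (by decide) (by decide) (by decide)

-- one step of A's fold updates the three fields independently, as B's per-line extractors say
theorem pvA_step_eq (s : String × String × String) (l : String) :
    pvA_step s l = ((pvB_verdict? (PySem.Str.strip l)).getD s.1,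
                    (pvB_evidence? (PySem.Str.strip l)).getD s.2.1,
                    (pvB_convention? (PySem.Str.strip l)).getD s.2.2) := by
  unfold pvA_step pvB_verdict? pvB_evidence? pvB_convention?
  simp only [pvA_after_colon, pvB_after_colon]
  set L := PySem.Str.strip l with hL
  by_cases hv : PySem.Str.startswith (PySem.Str.lower L) "verdict:" = true
  · rw [pv_startswith_v_not_e _ hv, pv_startswith_v_not_c _ hv] at *
    simp only [hv, if_true]
    split_ifs <;> simp_all
  · simp only [hv, Bool.false_eq_true, if_false]
    by_cases he : PySem.Str.startswith (PySem.Str.lower L) "evidence:" = true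
    · simp only [he, pv_startswith_e_not_c _ he, if_true, Bool.false_eq_true, if_false,
        Option.getD_some, Option.getD_none]
    · simp only [he, Bool.false_eq_true, if_false]
      by_cases hcv : PySem.Str.startswith (PySem.Str.lower L) "convention_value:" = true
      · simp only [hcv, if_true]
        split_ifs <;> simp
      · rw [if_neg hcv, if_neg hcv]
        simp

theorem pvB_last_append (xs : List String) (x : String) (f : String → Option String) (d : String) :
    pvB_last (xs ++ [x]) f d = pvB_last xs f ((f x).getD d) := by
  induction xs with
  | nil => simp only [List.nil_append, pvB_last]; cases f x <;> simp
  | cons y ys ih => simp [pvB_last]; cases f y <;> simp [ih]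

-- A's inner fold equals B's three reversed first-match searches, for any initial state
theorem pv_fold_eq (ls : List String) (s : String × String × String) :
    ls.foldl pvA_step s =
      (pvB_last (ls.map PySem.Str.strip).reverse pvB_verdict? s.1,
       pvB_last (ls.map PySem.Str.strip).reverse pvB_evidence? s.2.1,
       pvB_last (ls.map PySem.Str.strip).reverse pvB_convention? s.2.2) := by
  induction ls generalizing s with
  | nil => simp [pvB_last]
  | cons l ls ih =>
    simp only [List.foldl_cons, List.map_cons, List.reverse_cons, pvB_last_append]
    rw [ih, pvA_step_eq]

theorem pv_guard_eq (raw x y : String) :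
    ((PySem.Str.isIn x raw && PySem.Str.isIn y raw) = true) ↔
      (PySem.Str.find raw x ≠ -1 ∧ PySem.Str.find raw y ≠ -1) := by
  rw [Bool.and_eq_true, PySem.Str.isIn_iff_infix, PySem.Str.isIn_iff_infix,
    PySem.Str.find_ne_neg_one_iff, PySem.Str.find_ne_neg_one_iff]

-- A's loop body for one index equals B's pvB_one
theorem pv_body_eq (raw : String) (idx : Int) :
    (let begin_ := "---BEGIN_VERDICT_" ++ PySem.Int.toStr idx ++ "---"
     let end_ := "---END_VERDICT_" ++ PySem.Int.toStr idx ++ "---"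
     let t : String × String × String :=
       if PySem.Str.isIn begin_ raw && PySem.Str.isIn end_ raw then
         let start := PySem.Str.find raw begin_ + PySem.Str.len begin_
         let stop := PySem.Str.find raw end_
         let block := PySem.Str.strip (PySem.Str.slice raw (some start) (some stop))
         (PySem.Str.splitlines block).foldl pvA_step ("UNCERTAIN", "", "")
       else ("UNCERTAIN", "", "")
     [[("verdict", t.1), ("evidence", t.2.1), ("convention_value", t.2.2)]]) =
    [pvB_one raw idx] := by
  simp only [pvB_one]
  by_cases h : (PySem.Str.isIn ("---BEGIN_VERDICT_" ++ PySem.Int.toStr idx ++ "---") raw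
      && PySem.Str.isIn ("---END_VERDICT_" ++ PySem.Int.toStr idx ++ "---") raw) = true
  · have h' := (pv_guard_eq raw _ _).mp h
    simp only [h, if_true, if_pos h', pv_fold_eq]
  · have h' : ¬ (PySem.Str.find raw ("---BEGIN_VERDICT_" ++ PySem.Int.toStr idx ++ "---") ≠ -1 ∧
        PySem.Str.find raw ("---END_VERDICT_" ++ PySem.Int.toStr idx ++ "---") ≠ -1) :=
      fun hc => h ((pv_guard_eq raw _ _).mpr hc)
    simp only [h, Bool.false_eq_true, if_false, if_neg h']

-- ===== VERDICT (by name: the statement is the Claim_ definition above) =====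
theorem parse_guided_response_spec : Claim_equal_parse_guided_response := by
  intro raw n _
  unfold Spec_parse_guided_response parse_guided_response parse_guided_response_alt
  rw [show (fun (results : List (List (String × String))) (idx : Int) =>
      let begin_ := "---BEGIN_VERDICT_" ++ PySem.Int.toStr idx ++ "---"
      let end_ := "---END_VERDICT_" ++ PySem.Int.toStr idx ++ "---"
      let t : String × String × String :=
        if PySem.Str.isIn begin_ raw && PySem.Str.isIn end_ raw then
          let start := PySem.Str.find raw begin_ + PySem.Str.len begin_
          let stop := PySem.Str.find raw end_
          let block := PySem.Str.strip (PySem.Str.slice raw (some start) (some stop))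
          (PySem.Str.splitlines block).foldl pvA_step ("UNCERTAIN", "", "")
        else ("UNCERTAIN", "", "")
      results ++ [[("verdict", t.1), ("evidence", t.2.1), ("convention_value", t.2.2)]]) =
      (fun results idx => results ++ [pvB_one raw idx]) from funext fun r => funext fun i => by
        have := pv_body_eq raw i; simp only at this ⊢; rw [this]]
  rw [PySem.List.foldl_append_singleton_eq_map]
  simp
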